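-- pv_equiv track=rewrite | github.com/Ellitsa93/AirportSystem | users.py | create_seats_list
-- ===== SOURCE A (Python) =====
-- def create_seats_list(seats):
--     seats_list = list()
--     i = 0
--     while i < len(seats):
--         first_element = create_seat_for_showing(seats[i])
--         if i+1 >= len(seats):
--             second_element = ""
--         else:
--             second_element = create_seat_for_showing(seats[i+1])
--         if i+2 >= len(seats):
--             third_element = ""
--         else:
--             third_element = create_seat_for_showing(seats[i+2])
--         if i+3 >= len(seats):
--             fourth_element = ""
--         else:
--             fourth_element = create_seat_for_showing(seats[i+3])
--         seats_list.append([first_element, second_element, "", third_element,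
--                            fourth_element])
--         i += 4
--     return seats_list
--
-- def create_seat_for_showing(seat):
--     if(seat[1] == 0):
--         text = str(seat[0])
--     else:
--         text = "X"
--     return text
-- ===== SOURCE B (Python) =====
-- def create_seats_list(seats):
--     rows = []
--     cur = []
--     for seat in seats:
--         cur.append("X" if seat[1] else str(seat[0]))
--         if len(cur) == 4:
--             rows.append([cur[0], cur[1], "", cur[2], cur[3]])
--             cur = []
--     if cur:
--         cur += [""] * (4 - len(cur))
--         rows.append([cur[0], cur[1], "", cur[2], cur[3]])
--     return rows
-- ===== Notes on version B (the rewrite author's own statement) =====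
-- stated objective: simpler
-- what changed: Replaces A's stride-4 indexed while loop with four explicit i+k bound checks by a single element-at-a-time pass: an accumulator collects formatted seats, a row is flushed whenever four are collected, and one final padded flush handles the remainder, so no index arithmetic or bound checks remain.
import Mathlib
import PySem

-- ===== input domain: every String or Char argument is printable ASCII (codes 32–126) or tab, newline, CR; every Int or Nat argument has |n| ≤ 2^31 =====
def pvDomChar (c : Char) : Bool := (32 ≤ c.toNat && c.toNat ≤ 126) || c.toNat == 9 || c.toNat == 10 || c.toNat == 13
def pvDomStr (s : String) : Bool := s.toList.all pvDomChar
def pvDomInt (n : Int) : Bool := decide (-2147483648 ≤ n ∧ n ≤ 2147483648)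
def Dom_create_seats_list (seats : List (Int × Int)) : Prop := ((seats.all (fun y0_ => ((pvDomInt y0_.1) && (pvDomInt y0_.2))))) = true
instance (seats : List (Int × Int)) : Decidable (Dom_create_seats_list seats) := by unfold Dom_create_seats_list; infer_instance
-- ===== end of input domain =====

-- B changes: A's stride-4 indexed loop with four bound checks becomes a single element-at-a-time pass with a flush-on-4 accumulator (objective: simpler).

-- ===== PORT A =====
def create_seat_for_showing (seat : Int × Int) : String :=
  if seat.2 == 0 then PySem.Int.toStr seat.1 else "X"

def create_seats_list_loop (seats : List (Int × Int)) (i : Nat) : List (List String) :=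
  if h : i < seats.length then
    let first_element := create_seat_for_showing (seats.getD i (0, 0))
    let second_element := if i + 1 ≥ seats.length then "" else create_seat_for_showing (seats.getD (i+1) (0, 0))
    let third_element := if i + 2 ≥ seats.length then "" else create_seat_for_showing (seats.getD (i+2) (0, 0))
    let fourth_element := if i + 3 ≥ seats.length then "" else create_seat_for_showing (seats.getD (i+3) (0, 0))
    [first_element, second_element, "", third_element, fourth_element] :: create_seats_list_loop seats (i + 4)
  else []
termination_by seats.length - i

def create_seats_list (seats : List (Int × Int)) : List (List String) :=
  create_seats_list_loop seats 0

-- ===== PORT B =====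
-- "X" if seat[1] else str(seat[0])
def alt_fmt (seat : Int × Int) : String :=
  if seat.2 ≠ 0 then "X" else PySem.Int.toStr seat.1

-- the loop body: append the formatted seat to cur; flush a row when cur has 4 entries
def alt_step (st : List (List String) × List String) (seat : Int × Int) :
    List (List String) × List String :=
  let cur := st.2 ++ [alt_fmt seat]
  if cur.length == 4 then
    (st.1 ++ [[cur.getD 0 "", cur.getD 1 "", "", cur.getD 2 "", cur.getD 3 ""]], [])
  else (st.1, cur)

-- the trailing 'if cur:' flush with padding
def alt_finish (st : List (List String) × List String) : List (List String) :=
  if st.2.isEmpty then st.1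
  else
    let cur := st.2 ++ List.replicate (4 - st.2.length) ""
    st.1 ++ [[cur.getD 0 "", cur.getD 1 "", "", cur.getD 2 "", cur.getD 3 ""]]

def create_seats_list_alt (seats : List (Int × Int)) : List (List String) :=
  alt_finish (seats.foldl alt_step ([], []))

-- ===== PRECONDITION & SPEC =====
def Spec_create_seats_list (seats : List (Int × Int)) (out : List (List String)) : Prop := out = create_seats_list_alt seats
instance (seats : List (Int × Int)) (out : List (List String)) : Decidable (Spec_create_seats_list seats out) := by unfold Spec_create_seats_list; infer_instance

-- ===== CLAIM (what is proved, stated in full; the proofs are below) =====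
def Claim_equal_create_seats_list : Prop := ∀ (seats : List (Int × Int)), Dom_create_seats_list seats → Spec_create_seats_list seats (create_seats_list seats)

-- ===== LEMMAS AND PROOFS =====

-- proof-only middle form: recursion on chunks of four
def chunkRec : List (Int × Int) → List (List String)
  | [] => []
  | a :: t =>
    let l := a :: t
    let p := (l.take 4).map alt_fmt ++ List.replicate (4 - (l.take 4).length) ""
    [p.getD 0 "", p.getD 1 "", "", p.getD 2 "", p.getD 3 ""] :: chunkRec (l.drop 4)
termination_by l => l.length
decreasing_by simp [List.length_drop]

theorem fmt_eq (s : Int × Int) : create_seat_for_showing s = alt_fmt s := by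
  unfold create_seat_for_showing alt_fmt
  by_cases h : s.2 = 0 <;> simp [h]

theorem getD_drop {α : Type} (l : List α) (i k : Nat) (d : α) :
    l.getD (i + k) d = (l.drop i).getD k d := by
  simp [List.getD_eq_getElem?_getD, List.getElem?_drop]

theorem loop_eq_aux (seats : List (Int × Int)) (n : Nat) :
    ∀ i, seats.length - i ≤ n →
    create_seats_list_loop seats i = chunkRec (seats.drop i) := by
  induction n with
  | zero =>
    intro i hle
    have h : ¬ i < seats.length := by omega
    rw [create_seats_list_loop]
    simp [h, List.drop_eq_nil_of_le (by omega : seats.length ≤ i), chunkRec]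
  | succ n ih =>
    intro i hle
    by_cases h : i < seats.length
    · cases hd : seats.drop i with
      | nil => exfalso; have := congrArg List.length hd; simp at this; omega
      | cons a t =>
        have htail : seats.drop (i + 4) = t.drop 3 := by
          have : seats.drop (i + 4) = (seats.drop i).drop 4 := by rw [List.drop_drop]
          rw [this, hd]; rfl
        have hrec : create_seats_list_loop seats (i + 4) = chunkRec (seats.drop (i + 4)) := by
          refine ih (i + 4) ?_
          have := congrArg List.length hd; simp at this; omega
        have e0 : seats.getD i (0, 0) = a := by
          have := getD_drop seats i 0 ((0 : Int), (0 : Int)); rw [hd] at this; simpa using this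
        have e1 : seats.getD (i + 1) (0, 0) = (a :: t).getD 1 (0, 0) := by rw [getD_drop seats i 1, hd]
        have e2 : seats.getD (i + 2) (0, 0) = (a :: t).getD 2 (0, 0) := by rw [getD_drop seats i 2, hd]
        have e3 : seats.getD (i + 3) (0, 0) = (a :: t).getD 3 (0, 0) := by rw [getD_drop seats i 3, hd]
        have hl : seats.length - i = t.length + 1 := by
          have := congrArg List.length hd; simp at this; omega
        rw [create_seats_list_loop]
        simp only [h, dif_pos, hrec, htail, e0, e1, e2, e3]
        match t, hl with
        | [], hl =>
          have hl' : seats.length = i + 1 := by simp at hl; omega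
          have p1 : seats.length ≤ i + 1 := by omega
          have p2 : seats.length ≤ i + 2 := by omega
          have p3 : seats.length ≤ i + 3 := by omega
          rw [chunkRec]
          simp [fmt_eq, List.getD, p1, p2, p3]
        | [b], hl =>
          have hl' : seats.length = i + 2 := by simp at hl; omega
          have p1 : ¬ seats.length ≤ i + 1 := by omega
          have p2 : seats.length ≤ i + 2 := by omega
          have p3 : seats.length ≤ i + 3 := by omega
          rw [chunkRec]
          simp [fmt_eq, List.getD, p1, p2, p3]
        | [b, c], hl =>
          have hl' : seats.length = i + 3 := by simp at hl; omega
          have p1 : ¬ seats.length ≤ i + 1 := by omega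
          have p2 : ¬ seats.length ≤ i + 2 := by omega
          have p3 : seats.length ≤ i + 3 := by omega
          rw [chunkRec]
          simp [fmt_eq, List.getD, p1, p2, p3]
        | b :: c :: d :: t', hl =>
          have hl' : seats.length = i + 4 + t'.length := by simp at hl; omega
          have p1 : ¬ seats.length ≤ i + 1 := by omega
          have p2 : ¬ seats.length ≤ i + 2 := by omega
          have p3 : ¬ seats.length ≤ i + 3 := by omega
          rw [chunkRec]
          simp [fmt_eq, List.getD, p1, p2, p3]
    · rw [create_seats_list_loop]
      simp [h, List.drop_eq_nil_of_le (by omega : seats.length ≤ i), chunkRec]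

-- four steps starting from an empty accumulator flush exactly one row
theorem fold4 (a b c d : Int × Int) (t : List (Int × Int)) (rows : List (List String)) :
    (a :: b :: c :: d :: t).foldl alt_step (rows, []) =
      t.foldl alt_step
        (rows ++ [[alt_fmt a, alt_fmt b, "", alt_fmt c, alt_fmt d]], []) := by
  simp [List.foldl, alt_step, List.getD]

theorem alt_eq_chunk_aux (n : Nat) :
    ∀ l : List (Int × Int), l.length ≤ n → ∀ rows : List (List String),
    alt_finish (l.foldl alt_step (rows, [])) = rows ++ chunkRec l := by
  induction n with
  | zero =>
    intro l hl rows
    have : l = [] := List.eq_nil_of_length_eq_zero (by omega)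
    subst this
    simp [alt_finish, chunkRec]
  | succ n ih =>
    intro l hl rows
    match l with
    | [] => simp [alt_finish, chunkRec]
    | [a] =>
      rw [chunkRec]
      simp [List.foldl, alt_step, alt_finish, List.getD]
      rw [chunkRec]
    | [a, b] =>
      rw [chunkRec]
      simp [List.foldl, alt_step, alt_finish, List.getD]
      rw [chunkRec]
    | [a, b, c] =>
      rw [chunkRec]
      simp [List.foldl, alt_step, alt_finish, List.getD]
      rw [chunkRec]
    | a :: b :: c :: d :: t =>
      rw [fold4, chunkRec]
      have ht : t.length ≤ n := by simp at hl; omega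
      rw [ih t ht]
      simp [List.getD]

theorem alt_eq_chunk (l : List (Int × Int)) : create_seats_list_alt l = chunkRec l := by
  unfold create_seats_list_alt
  simpa using alt_eq_chunk_aux l.length l (le_refl _) []

-- ===== VERDICT (by name: the statement is the Claim_ definition above) =====
theorem create_seats_list_spec : Claim_equal_create_seats_list := by
  intro seats _
  unfold Spec_create_seats_list create_seats_list
  rw [alt_eq_chunk]
  simpa using loop_eq_aux seats seats.length 0 (by omega)
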